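-- pv_equiv track=rewrite | github.com/goldmansachs/gs-quant | gs_quant/timeseries/measures_reports.py | _max_recovery_period
-- ===== SOURCE A (Python) =====
-- def _max_recovery_period(series):
--     peak = series[0]
--     recovery_periods = []
--     current_drawdown = 0
--     in_drawdown = False
--
--     for val in series[1:]:
--         if val < peak:
--             in_drawdown = True
--             current_drawdown += 1
--         else:
--             if in_drawdown:
--                 recovery_periods.append(current_drawdown)
--                 in_drawdown = False
--             peak = val
--             current_drawdown = 0
--     return max(recovery_periods) if recovery_periods else 0
-- ===== SOURCE B (Python) =====
-- def _running_max(series):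
--     m = series[0]
--     out = []
--     for v in series:
--         if v > m:
--             m = v
--         out.append(m)
--     return out
--
--
-- def _true_run_lengths(flags):
--     runs = []
--     cur = 0
--     for f in flags:
--         if f:
--             cur += 1
--         else:
--             if cur != 0:
--                 runs.append(cur)
--             cur = 0
--     if cur != 0:
--         runs.append(cur)
--     return runs
--
--
-- def _max_recovery_period(series):
--     prefix = _running_max(series)
--     below = [v < m for v, m in zip(series[1:], prefix)]
--     runs = _true_run_lengths(below)
--     if below and below[-1]:
--         runs = runs[:-1]
--     return max(runs) if runs else 0
-- ===== Notes on version B (the rewrite author's own statement) =====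
-- stated objective: alternative
-- what changed: B replaces A's single fused loop carrying peak/counter/flag state with separate passes: build the prefix-maximum list, derive below-peak boolean flags by zipping, collect run-lengths of True flags, drop the trailing unrecovered run, and take the max.
import Mathlib
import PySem

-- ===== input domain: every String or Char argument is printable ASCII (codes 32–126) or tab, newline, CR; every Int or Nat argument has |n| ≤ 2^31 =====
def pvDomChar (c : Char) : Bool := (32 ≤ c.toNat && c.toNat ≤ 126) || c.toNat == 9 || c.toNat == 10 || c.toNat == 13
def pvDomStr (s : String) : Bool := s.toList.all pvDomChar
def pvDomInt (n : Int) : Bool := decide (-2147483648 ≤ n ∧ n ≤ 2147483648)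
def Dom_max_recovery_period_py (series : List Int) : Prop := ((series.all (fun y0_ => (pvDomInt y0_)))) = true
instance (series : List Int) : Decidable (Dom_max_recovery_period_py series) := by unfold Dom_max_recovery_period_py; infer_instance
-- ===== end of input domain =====

-- B recomputes the answer in separate passes (prefix-maximum list, below-peak flags, run-length
-- grouping) instead of A's single fused loop with peak/counter/flag state; objective: alternative.


-- ===== PORT A =====
-- state = (peak, recovery_periods, current_drawdown, in_drawdown)
def max_recovery_period_py (series : List Int) : Int :=
  match series with
  | [] => 0   -- unreachable: series[0] raises IndexError, excluded by Pre_
  | peak0 :: _ =>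
    let st := (PySem.List.slice series (some 1) none).foldl
      (fun (s : Int × List Int × Int × Bool) val =>
        if val < s.1 then (s.1, s.2.1, s.2.2.1 + 1, true)
        else
          let runs := if s.2.2.2 then s.2.1 ++ [s.2.2.1] else s.2.1
          (val, runs, 0, false))
      (peak0, [], 0, false)
    if st.2.1 ≠ [] then (PySem.List.max? st.2.1 (fun y => y)).getD 0 else 0

-- ===== PORT B =====
-- B-side helper: running maximum list (python _running_max)
def pvRunningMax (series : List Int) : List Int :=
  match series with
  | [] => []   -- unreachable: series[0] raises IndexError, excluded by Pre_
  | m0 :: _ =>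
    (series.foldl (fun (s : Int × List Int) v =>
      let m := if v > s.1 then v else s.1
      (m, s.2 ++ [m])) (m0, [])).2

-- B-side helper: lengths of maximal runs of true (python _true_run_lengths)
def pvTrueRunLengths (flags : List Bool) : List Int :=
  let st := flags.foldl (fun (s : List Int × Int) f =>
    if f then (s.1, s.2 + 1)
    else if s.2 ≠ 0 then (s.1 ++ [s.2], 0) else (s.1, 0)) ([], 0)
  if st.2 ≠ 0 then st.1 ++ [st.2] else st.1

def max_recovery_period_py_alt (series : List Int) : Int :=
  let pref := pvRunningMax series
  let below := ((PySem.List.slice series (some 1) none).zip pref).map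
    (fun p => decide (p.1 < p.2))
  let runs := pvTrueRunLengths below
  let runs := if below ≠ [] ∧ (PySem.List.pyGetD below (-1) false) = true
              then PySem.List.slice runs none (some (-1)) else runs
  if runs ≠ [] then (PySem.List.max? runs (fun y => y)).getD 0 else 0

-- ===== PRECONDITION & SPEC =====
-- A evaluates series[0], which raises IndexError on the empty list; B raises there too.
def Pre_max_recovery_period_py (series : List Int) : Prop := series ≠ []
instance (series : List Int) : Decidable (Pre_max_recovery_period_py series) := by
  unfold Pre_max_recovery_period_py; infer_instance
def pvWitness_max_recovery_period_py : List Int := [3, 1, 2, 5, 4]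

def Spec_max_recovery_period_py (series : List Int) (out : Int) : Prop := out = max_recovery_period_py_alt series
instance (series : List Int) (out : Int) : Decidable (Spec_max_recovery_period_py series out) := by unfold Spec_max_recovery_period_py; infer_instance

-- ===== CLAIM (what is proved, stated in full; the proofs are below) =====
def Claim_equal_max_recovery_period_py : Prop := ∀ (series : List Int), Dom_max_recovery_period_py series → Pre_max_recovery_period_py series → Spec_max_recovery_period_py series (max_recovery_period_py series)

-- ===== LEMMAS AND PROOFS =====

-- reference below-peak flags: flag = (v < running peak so far)
def pvBelowFlags (peak : Int) : List Int → List Bool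
  | [] => []
  | v :: vs => decide (v < peak) :: pvBelowFlags (if v > peak then v else peak) vs

-- reference completed-run lengths, given the length cd of the currently open run
def pvCompleted (cd : Int) : List Bool → List Int
  | [] => []
  | true :: fs => pvCompleted (cd + 1) fs
  | false :: fs => (if cd ≠ 0 then [cd] else []) ++ pvCompleted 0 fs

-- length of the trailing true-run (starting from an open run of length cd)
def pvTrailing (cd : Int) : List Bool → Int
  | [] => cd
  | true :: fs => pvTrailing (cd + 1) fs
  | false :: fs => pvTrailing 0 fs

theorem aFold_runs (rest : List Int) : ∀ (peak : Int) (runs : List Int) (cd : Int), 0 ≤ cd →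
    (rest.foldl (fun (s : Int × List Int × Int × Bool) val =>
        if val < s.1 then (s.1, s.2.1, s.2.2.1 + 1, true)
        else
          let r := if s.2.2.2 then s.2.1 ++ [s.2.2.1] else s.2.1
          (val, r, 0, false))
      (peak, runs, cd, decide (cd ≠ 0))).2.1
    = runs ++ pvCompleted cd (pvBelowFlags peak rest) := by
  induction rest with
  | nil => intro peak runs cd _; simp [pvCompleted, pvBelowFlags]
  | cons v vs ih =>
    intro peak runs cd hcd
    by_cases h : v < peak
    · simp only [List.foldl_cons, if_pos h, pvBelowFlags, decide_eq_true_eq]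
      have : (decide (v < peak)) = true := by simp [h]
      rw [this]
      have hne : (if v > peak then v else peak) = peak := by
        have : ¬ v > peak := by omega
        simp [this]
      simp only [pvCompleted]
      have h1 : (decide (cd + 1 ≠ 0)) = true := by
        have : cd + 1 ≠ 0 := by omega
        simp [this]
      calc (vs.foldl _ (peak, runs, cd + 1, true)).2.1
          = (vs.foldl (fun (s : Int × List Int × Int × Bool) val =>
              if val < s.1 then (s.1, s.2.1, s.2.2.1 + 1, true)
              else
                let r := if s.2.2.2 then s.2.1 ++ [s.2.2.1] else s.2.1
                (val, r, 0, false)) (peak, runs, cd + 1, decide (cd + 1 ≠ 0))).2.1 := by rw [h1]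
        _ = runs ++ pvCompleted (cd + 1) (pvBelowFlags peak vs) := ih peak runs (cd + 1) (by omega)
        _ = _ := by rw [hne]
    · simp only [List.foldl_cons, if_neg h]
      have hflag : (decide (v < peak)) = false := by simp [h]
      have hpkv : (if v > peak then v else peak) = v := by
        by_cases hg : v > peak
        · simp [hg]
        · have : v = peak := by omega
          simp [this]
      have hz : (decide ((0:Int) ≠ 0)) = false := by simp
      simp only [pvBelowFlags, hflag, pvCompleted, hpkv]
      by_cases hd : cd ≠ 0
      · have hdt : (decide (cd ≠ 0)) = true := by simp [hd]
        rw [hdt]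
        have h2 := ih v (runs ++ [cd]) 0 (le_refl 0)
        rw [hz] at h2
        simpa [hd, List.append_assoc] using h2
      · have hcd0 : cd = 0 := by omega
        subst hcd0
        have : (decide ((0:Int) ≠ 0)) = false := by simp
        rw [this]
        simp only [Bool.false_eq_true, if_false]
        have := ih v runs 0 (le_refl 0)
        rw [hz] at this
        simp [this]

theorem bFold_state (flags : List Bool) : ∀ (runs : List Int) (cur : Int), 0 ≤ cur →
    (flags.foldl (fun (s : List Int × Int) f =>
        if f then (s.1, s.2 + 1)
        else if s.2 ≠ 0 then (s.1 ++ [s.2], 0) else (s.1, 0)) (runs, cur))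
    = (runs ++ pvCompleted cur flags, pvTrailing cur flags) := by
  induction flags with
  | nil => intro runs cur _; simp [pvCompleted, pvTrailing]
  | cons f fs ih =>
    intro runs cur hcur
    cases f with
    | true =>
      simp only [List.foldl_cons, if_pos (by trivial : True), pvCompleted, pvTrailing]
      simpa using ih runs (cur + 1) (by omega)
    | false =>
      simp only [List.foldl_cons, pvCompleted, pvTrailing]
      by_cases hd : cur ≠ 0
      · simp only [if_pos hd, Bool.false_eq_true, if_false]
        rw [ih (runs ++ [cur]) 0 (le_refl 0)]
        simp
      · have : cur = 0 := by omega
        subst this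
        simp only [Bool.false_eq_true, if_false, if_neg (by simp : ¬ ((0:Int) ≠ 0))]
        rw [ih runs 0 (le_refl 0)]
        simp

-- trailing-run length vs the last flag
theorem trailing_last_true (flags : List Bool) : ∀ (cur : Int), 0 ≤ cur →
    (flags.getLastD false = true → 0 < pvTrailing cur flags) ∧
    (flags ≠ [] → flags.getLastD false = false → pvTrailing cur flags = 0) := by
  induction flags with
  | nil =>
    intro cur h
    exact ⟨fun hl => by simp at hl, fun hne => absurd rfl hne⟩
  | cons f fs ih =>
    intro cur hcur
    cases fs with
    | nil =>
      cases f with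
      | true =>
        refine ⟨fun _ => ?_, fun _ hl => by simp at hl⟩
        show 0 < pvTrailing (cur + 1) []
        simp [pvTrailing]; omega
      | false => exact ⟨fun hl => by simp at hl, fun _ _ => by simp [pvTrailing]⟩
    | cons g gs =>
      cases f with
      | true =>
        have h := ih (cur + 1) (by omega)
        exact ⟨fun hl => h.1 (by simpa using hl), fun _ hl => h.2 (by simp) (by simpa using hl)⟩
      | false =>
        have h := ih 0 (le_refl 0)
        exact ⟨fun hl => h.1 (by simpa using hl), fun _ hl => h.2 (by simp) (by simpa using hl)⟩

-- pvTrueRunLengths computes completed runs plus the trailing open run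
theorem trueRunLengths_eq (flags : List Bool) :
    pvTrueRunLengths flags =
      if pvTrailing 0 flags ≠ 0 then pvCompleted 0 flags ++ [pvTrailing 0 flags]
      else pvCompleted 0 flags := by
  unfold pvTrueRunLengths
  rw [bFold_state flags [] 0 (le_refl 0)]
  simp

-- the running-max fold accumulates exactly the recursive running-max list
def pvRmList (m : Int) : List Int → List Int
  | [] => []
  | v :: vs => (if v > m then v else m) :: pvRmList (if v > m then v else m) vs

theorem rm_fold (l : List Int) : ∀ (m : Int) (acc : List Int),
    (l.foldl (fun (s : Int × List Int) v =>
      let mm := if v > s.1 then v else s.1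
      (mm, s.2 ++ [mm])) (m, acc)).2 = acc ++ pvRmList m l := by
  induction l with
  | nil => intro m acc; simp [pvRmList]
  | cons v vs ih =>
    intro m acc
    simp only [List.foldl_cons, pvRmList]
    rw [ih]
    simp

theorem zip_rm_eq_belowFlags (rest : List Int) : ∀ (m : Int),
    (rest.zip (m :: pvRmList m rest)).map (fun p => decide (p.1 < p.2))
      = pvBelowFlags m rest := by
  induction rest with
  | nil => intro m; simp [pvBelowFlags]
  | cons v vs ih =>
    intro m
    simp only [pvRmList, List.zip_cons_cons, List.map_cons, pvBelowFlags]
    congr 1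
    exact ih (if v > m then v else m)

-- below list via zip equals pvBelowFlags peak0 rest
theorem below_eq (peak0 : Int) (rest : List Int) :
    ((PySem.List.slice (peak0 :: rest) (some 1) none).zip (pvRunningMax (peak0 :: rest))).map
      (fun p => decide (p.1 < p.2)) = pvBelowFlags peak0 rest := by
  have hs : PySem.List.slice (peak0 :: rest) (some (1:Int)) none = rest := by
    have := PySem.List.slice_from_natCast (xs := peak0 :: rest) (a := 1)
    simpa using this
  rw [hs]
  have hrm : pvRunningMax (peak0 :: rest) = peak0 :: pvRmList peak0 rest := by
    have hdef : pvRunningMax (peak0 :: rest) = ((peak0 :: rest).foldl (fun (s : Int × List Int) v =>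
        let m := if v > s.1 then v else s.1
        (m, s.2 ++ [m])) (peak0, [])).2 := rfl
    rw [hdef, rm_fold]
    simp only [pvRmList]
    have : (if peak0 > peak0 then peak0 else peak0) = peak0 := by simp
    rw [this]
    simp
  rw [hrm]
  exact zip_rm_eq_belowFlags rest peak0

-- getLastD of flags as pyGetD (-1)
theorem pyGetD_neg_one_getLastD (flags : List Bool) (h : flags ≠ []) :
    PySem.List.pyGetD flags (-1) false = flags.getLastD false := by
  rw [PySem.List.pyGetD_neg_one flags false h]
  cases flags with
  | nil => exact absurd rfl h
  | cons f fs => simp [List.getLastD_eq_getLast?, List.getLast?_eq_some_getLast]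

theorem max_recovery_period_py_spec : Claim_equal_max_recovery_period_py := by
  intro series _ hpre
  unfold Spec_max_recovery_period_py
  cases series with
  | nil => exact absurd rfl hpre
  | cons peak0 rest =>
    unfold max_recovery_period_py max_recovery_period_py_alt
    have hslice : PySem.List.slice (peak0 :: rest) (some (1:Int)) none = rest := by
      simpa using PySem.List.slice_from_natCast (xs := peak0 :: rest) (a := 1)
    have hz : (decide ((0:Int) ≠ 0)) = false := by simp
    have hA := aFold_runs rest peak0 [] 0 (le_refl 0)
    rw [hz] at hA
    have hBflags := below_eq peak0 rest
    simp only [hslice] at hA hBflags ⊢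
    simp only [hBflags]
    rw [show (List.foldl (fun (s : Int × List Int × Int × Bool) val =>
        if val < s.1 then (s.1, s.2.1, s.2.2.1 + 1, true)
        else (val, if s.2.2.2 = true then s.2.1 ++ [s.2.2.1] else s.2.1, 0, false))
        (peak0, [], 0, false) rest).2.1 = pvCompleted 0 (pvBelowFlags peak0 rest) from by
      simpa using hA]
    rw [trueRunLengths_eq (pvBelowFlags peak0 rest)]
    generalize pvBelowFlags peak0 rest = flags
    by_cases hne : flags = []
    · subst hne
      simp [pvTrailing, pvCompleted]
    · have hget := pyGetD_neg_one_getLastD flags hne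
      cases hlast : flags.getLastD false with
      | true =>
        have htr : 0 < pvTrailing 0 flags := (trailing_last_true flags 0 (le_refl 0)).1 hlast
        have htrne : pvTrailing 0 flags ≠ 0 := by omega
        rw [if_pos htrne,
          if_pos ((⟨hne, by rw [hget, hlast]⟩ : flags ≠ [] ∧ PySem.List.pyGetD flags (-1) false = true))]
        have hdl : PySem.List.slice (pvCompleted 0 flags ++ [pvTrailing 0 flags]) none (some (-1)) = pvCompleted 0 flags := by
          rw [show ((-1 : Int)) = -((1:Nat):Int) by norm_num]
          rw [PySem.List.slice_to_neg_natCast (xs := pvCompleted 0 flags ++ [pvTrailing 0 flags]) (k := 1) (by omega)]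
          simp
        rw [hdl]
      | false =>
        have htr0 : pvTrailing 0 flags = 0 := (trailing_last_true flags 0 (le_refl 0)).2 hne hlast
        rw [if_neg (show ¬(pvTrailing 0 flags ≠ 0) by simp [htr0]),
          if_neg (show ¬(flags ≠ [] ∧ PySem.List.pyGetD flags (-1) false = true) by
            rw [hget, hlast]; simp)]
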